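-- pv_equiv track=rewrite | github.com/federico-demarchi/training | src/exercise_1_maze/part_1_maze.py | make_maze
-- ===== SOURCE A (Python) =====
-- def make_maze(maze):
--     result = ''
--     for row in maze:
--         line1 = ''
--         line2 = ''
--         line3 = ''
--         for tile in row:
--             line1 = line1 + tile[0:3]
--             line2 = line2 + tile[3:6]
--             line3 = line3 + tile[6:9]
--         result = result + line1 + "\n" + line2 + "\n" + line3 + "\n"
--     return result
-- ===== SOURCE B (Python) =====
-- def make_maze(maze):
--     lines = []
--     for row in maze:
--         for start in (0, 3, 6):
--             lines.append(''.join(tile[start:start + 3] for tile in row))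
--     return ''.join(line + '\n' for line in lines)
-- ===== Notes on version B (the rewrite author's own statement) =====
-- stated objective: alternative
-- what changed: Instead of one pass per row maintaining three line accumulators simultaneously, B makes three independent scans of each row (one per slice offset 0/3/6), building each output line with ''.join, and joins all lines at the end.
import Mathlib
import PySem

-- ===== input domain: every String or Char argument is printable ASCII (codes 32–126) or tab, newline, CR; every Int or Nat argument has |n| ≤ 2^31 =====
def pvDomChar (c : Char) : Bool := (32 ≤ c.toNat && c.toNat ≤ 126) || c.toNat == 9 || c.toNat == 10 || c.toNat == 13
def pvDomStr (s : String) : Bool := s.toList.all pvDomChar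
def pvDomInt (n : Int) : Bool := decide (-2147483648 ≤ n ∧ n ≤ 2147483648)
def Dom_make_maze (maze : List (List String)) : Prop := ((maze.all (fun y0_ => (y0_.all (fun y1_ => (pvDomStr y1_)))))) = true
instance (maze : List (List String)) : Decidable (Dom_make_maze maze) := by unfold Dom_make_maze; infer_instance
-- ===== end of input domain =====

-- B renders the maze by three independent scans per row (one per slice offset), joining lines at the end,
-- instead of A's single pass per row that maintains three line accumulators simultaneously; same cost, different decomposition.


-- ===== PORT A =====
-- strings are handled on the List Char side (PySem.Chars / PySem.List.slice are exact for Python's slicing)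
def make_maze (maze : List (List String)) : String :=
  String.ofList <|
    maze.foldl (fun result row =>
      let lines :=
        row.foldl (fun (acc : List Char × List Char × List Char) tile =>
          (acc.1 ++ PySem.List.slice tile.toList (some 0) (some 3),
           acc.2.1 ++ PySem.List.slice tile.toList (some 3) (some 6),
           acc.2.2 ++ PySem.List.slice tile.toList (some 6) (some 9)))
          ([], [], [])
      result ++ lines.1 ++ ['\n'] ++ lines.2.1 ++ ['\n'] ++ lines.2.2 ++ ['\n']) []

-- ===== PORT B =====
def make_maze_alt (maze : List (List String)) : String :=
  let lines : List (List Char) :=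
    maze.flatMap (fun row =>
      [(0 : Int), 3, 6].map (fun start =>
        PySem.Chars.join [] (row.map (fun tile =>
          PySem.List.slice tile.toList (some start) (some (start + 3))))))
  String.ofList (PySem.Chars.join [] (lines.map (fun line => line ++ ['\n'])))

-- ===== PRECONDITION & SPEC =====
def Spec_make_maze (maze : List (List String)) (out : String) : Prop := out = make_maze_alt maze
instance (maze : List (List String)) (out : String) : Decidable (Spec_make_maze maze out) := by unfold Spec_make_maze; infer_instance

-- ===== CLAIM (what is proved, stated in full; the proofs are below) =====
def Claim_equal_make_maze : Prop := ∀ (maze : List (List String)), Dom_make_maze maze → Spec_make_maze maze (make_maze maze)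

-- ===== LEMMAS AND PROOFS =====

-- ''.join over char lists is flatten
theorem join_nil_flatten (ls : List (List Char)) : PySem.Chars.join [] ls = ls.flatten := by
  induction ls with
  | nil => rfl
  | cons h t ih =>
    cases t with
    | nil => simp [PySem.Chars.join, List.intercalate]
    | cons h2 t2 =>
      simp [PySem.Chars.join, List.intercalate, List.intersperse] at *
      simpa using ih

-- A's inner three-accumulator fold computed in closed form
theorem inner_fold_eq (row : List String) (a b c : List Char) :
    row.foldl (fun (acc : List Char × List Char × List Char) tile =>
          (acc.1 ++ PySem.List.slice tile.toList (some 0) (some 3),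
           acc.2.1 ++ PySem.List.slice tile.toList (some 3) (some 6),
           acc.2.2 ++ PySem.List.slice tile.toList (some 6) (some 9))) (a, b, c)
      = (a ++ (row.map (fun t => PySem.List.slice t.toList (some 0) (some 3))).flatten,
         b ++ (row.map (fun t => PySem.List.slice t.toList (some 3) (some 6))).flatten,
         c ++ (row.map (fun t => PySem.List.slice t.toList (some 6) (some 9))).flatten) := by
  induction row generalizing a b c with
  | nil => simp
  | cons t ts ih =>
    rw [List.foldl_cons, ih]
    simp

-- A's outer fold in closed form
theorem outer_fold_eq (maze : List (List String)) (acc : List Char) :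
    maze.foldl (fun result row =>
      let lines :=
        row.foldl (fun (acc : List Char × List Char × List Char) tile =>
          (acc.1 ++ PySem.List.slice tile.toList (some 0) (some 3),
           acc.2.1 ++ PySem.List.slice tile.toList (some 3) (some 6),
           acc.2.2 ++ PySem.List.slice tile.toList (some 6) (some 9)))
          ([], [], [])
      result ++ lines.1 ++ ['\n'] ++ lines.2.1 ++ ['\n'] ++ lines.2.2 ++ ['\n']) acc
      = acc ++ maze.flatMap (fun row =>
          (row.map (fun t => PySem.List.slice t.toList (some 0) (some 3))).flatten ++ ['\n'] ++
          (row.map (fun t => PySem.List.slice t.toList (some 3) (some 6))).flatten ++ ['\n'] ++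
          (row.map (fun t => PySem.List.slice t.toList (some 6) (some 9))).flatten ++ ['\n']) := by
  induction maze generalizing acc with
  | nil => simp
  | cons r rs ih =>
    rw [List.foldl_cons, ih]
    simp only [inner_fold_eq, List.nil_append]
    simp

-- ===== VERDICT (by name: the statement is the Claim_ definition above) =====
theorem make_maze_spec : Claim_equal_make_maze := by
  intro maze hd
  clear hd
  unfold Spec_make_maze make_maze make_maze_alt
  rw [outer_fold_eq]
  simp only [join_nil_flatten, List.map_flatMap, List.nil_append]
  congr 1
  induction maze with
  | nil => rfl
  | cons r rs ih =>
    simp at ih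
    simp [ih]
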